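-- pv_equiv track=rewrite | github.com/pypi-data/pypi-mirror-374 | packages/pykeedy/pykeedy-0.1.1-py3-none-any.whl/pykeedy/slots.py | can_generate_word
-- ===== SOURCE A (Python) =====
-- def can_generate_word(word: str, slot_list: list[list[str]]) -> bool:
--     memo = {}
--
--     def dp(word_index: int, slot_index: int) -> bool:
--         if (word_index, slot_index) in memo:
--             return memo[(word_index, slot_index)]
--
--         # Base cases
--         if word_index == len(word):
--             # Success if we've consumed all the word (regardless of remaining slots)
--             result = True
--         elif slot_index >= len(slot_list):
--             # Failed if we have remaining word but no more slots
--             result = False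
--         else:
--             result = False
--
--             # Option 1: Skip this slot (use 0 elements)
--             if dp(word_index, slot_index + 1):
--                 result = True
--             else:
--                 # Option 2: Try each element in current slot (use 1 element)
--                 for option in slot_list[slot_index]:
--                     if word[word_index:].startswith(option):
--                         if dp(word_index + len(option), slot_index + 1):
--                             result = True
--                             break
--
--         memo[(word_index, slot_index)] = result
--         return result
--
--     return dp(0, 0)
-- ===== SOURCE B (Python) =====
-- def can_generate_word(word: str, slot_list: list[list[str]]) -> bool:
--     reachable = {0}
--     for slot in slot_list:
--         additions = {i + len(opt) for i in reachable for opt in slot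
--                      if word.startswith(opt, i)}
--         reachable |= additions
--     return len(word) in reachable
-- ===== Notes on version B (the rewrite author's own statement) =====
-- stated objective: faster
-- what changed: Replaced the memoized top-down recursion over (word_index, slot_index) with a forward iterative reachability DP: a set of reachable word positions is pushed through the slots one by one, and the answer is whether len(word) is reachable at the end.
import Mathlib
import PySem

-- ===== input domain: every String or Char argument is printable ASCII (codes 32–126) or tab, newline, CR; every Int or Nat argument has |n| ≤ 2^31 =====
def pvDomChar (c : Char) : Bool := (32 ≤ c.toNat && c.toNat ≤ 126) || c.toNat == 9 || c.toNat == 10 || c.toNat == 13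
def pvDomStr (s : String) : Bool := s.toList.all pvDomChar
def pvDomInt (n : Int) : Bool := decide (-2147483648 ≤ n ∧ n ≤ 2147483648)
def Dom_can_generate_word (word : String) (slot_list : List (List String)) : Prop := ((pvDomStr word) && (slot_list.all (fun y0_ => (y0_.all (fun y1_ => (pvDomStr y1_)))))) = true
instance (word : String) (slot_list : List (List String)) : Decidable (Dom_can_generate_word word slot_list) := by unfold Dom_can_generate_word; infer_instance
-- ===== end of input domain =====

-- B replaces A's memoized top-down recursion with a forward iterative reachability-set DP
-- (same asymptotics, measurably faster in Python); A's memo dict is a pure cache and is omitted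
-- from A's port, whose recursion is otherwise step for step A's dp.


-- ===== PORT A =====
-- A's inner dp(word_index, slot_index); the memo dict is a pure cache (it never changes
-- any returned value) and is not threaded through the port; branch order is A's.
def pvDpA (cs : List Char) (slot_list : List (List String)) (word_index slot_index : Nat) : Bool :=
  if word_index = cs.length then
    true
  else if slot_list.length ≤ slot_index then
    false
  else
    if pvDpA cs slot_list word_index (slot_index + 1) then
      true
    else
      -- for option in slot_list[slot_index]: first success breaks
      (slot_list.getD slot_index []).any fun option =>
        PySem.Chars.startswith (PySem.List.slice cs (some (word_index : Int)) none) option.toList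
          && pvDpA cs slot_list (word_index + option.toList.length) (slot_index + 1)
termination_by slot_list.length - slot_index
decreasing_by all_goals omega

def can_generate_word (word : String) (slot_list : List (List String)) : Bool :=
  pvDpA word.toList slot_list 0 0

-- ===== PORT B =====
-- word.startswith(opt, i): False when the start index exceeds len(word)
def pvStartswithAt (cs : List Char) (p : List Char) (i : Nat) : Bool :=
  i ≤ cs.length && PySem.Chars.startswith (cs.drop i) p

-- one iteration of B's loop: reachable |= additions
def pvStep (cs : List Char) (reachable : PySem.Set Nat) (slot : List String) : PySem.Set Nat :=
  PySem.Set.union reachable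
    (PySem.Set.ofList (reachable.flatMap fun i =>
      (slot.filter fun opt => pvStartswithAt cs opt.toList i).map fun opt => i + opt.toList.length))

def can_generate_word_alt (word : String) (slot_list : List (List String)) : Bool :=
  let cs := word.toList
  let reachable := slot_list.foldl (pvStep cs) (PySem.Set.ofList [0])
  PySem.Set.contains reachable cs.length

-- ===== PRECONDITION & SPEC =====
def Spec_can_generate_word (word : String) (slot_list : List (List String)) (out : Bool) : Prop := out = can_generate_word_alt word slot_list
instance (word : String) (slot_list : List (List String)) (out : Bool) : Decidable (Spec_can_generate_word word slot_list out) := by unfold Spec_can_generate_word; infer_instance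

-- ===== CLAIM (what is proved, stated in full; the proofs are below) =====
def Claim_equal_can_generate_word : Prop := ∀ (word : String) (slot_list : List (List String)), Dom_can_generate_word word slot_list → Spec_can_generate_word word slot_list (can_generate_word word slot_list)

-- ===== LEMMAS AND PROOFS =====

-- membership in one step of B's loop
theorem mem_pvStep (cs : List Char) (S : PySem.Set Nat) (slot : List String) (j : Nat) :
    j ∈ pvStep cs S slot ↔ j ∈ S ∨ ∃ i ∈ S, ∃ opt ∈ slot,
      pvStartswithAt cs opt.toList i = true ∧ j = i + opt.toList.length := by
  simp [pvStep, PySem.Set.mem_union, PySem.Set.mem_ofList, List.mem_flatMap,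
    List.mem_filter, List.mem_map]
  constructor
  · rintro (h | ⟨i, hi, opt, ⟨ho, hs⟩, hj⟩)
    · exact Or.inl h
    · exact Or.inr ⟨i, hi, opt, ho, hs, hj.symm⟩
  · rintro (h | ⟨i, hi, opt, ho, hs, hj⟩)
    · exact Or.inl h
    · exact Or.inr ⟨i, hi, opt, ⟨ho, hs⟩, hj.symm⟩

theorem pvStartswithAt_le (cs : List Char) (p : List Char) (i : Nat)
    (h : pvStartswithAt cs p i = true) : i + p.length ≤ cs.length := by
  simp only [pvStartswithAt, Bool.and_eq_true, decide_eq_true_eq] at h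
  have := (PySem.Chars.startswith_iff _ _).mp h.2
  have := this.length_le
  simp [List.length_drop] at this
  omega

theorem pvStep_bound (cs : List Char) (S : PySem.Set Nat) (slot : List String)
    (hS : ∀ i ∈ S, i ≤ cs.length) : ∀ j ∈ pvStep cs S slot, j ≤ cs.length := by
  intro j hj
  rcases (mem_pvStep cs S slot j).mp hj with h | ⟨i, _, opt, _, hs, hj⟩
  · exact hS j h
  · have := pvStartswithAt_le cs opt.toList i hs
    omega

-- A's dp is true at the end of the word, for any slot index
theorem pvDpA_end (cs : List Char) (slot_list : List (List String)) (si : Nat) :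
    pvDpA cs slot_list cs.length si = true := by
  rw [pvDpA]; simp

-- past the slots, dp i si decides i = len
theorem pvDpA_past (cs : List Char) (slot_list : List (List String)) (i si : Nat)
    (h : slot_list.length ≤ si) : (pvDpA cs slot_list i si = true ↔ i = cs.length) := by
  rw [pvDpA]
  by_cases hi : i = cs.length <;> simp [hi, h]

-- unfolding of A's dp at a live slot index, for in-range word positions
theorem pvDpA_cons (cs : List Char) (slot_list : List (List String)) (i si : Nat)
    (hsi : si < slot_list.length) (hi : i ≤ cs.length) :
    (pvDpA cs slot_list i si = true ↔
      pvDpA cs slot_list i (si + 1) = true ∨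
      ∃ opt ∈ slot_list.getD si [], pvStartswithAt cs opt.toList i = true ∧
        pvDpA cs slot_list (i + opt.toList.length) (si + 1) = true) := by
  constructor
  · intro hdp
    rw [pvDpA] at hdp
    by_cases h1 : i = cs.length
    · exact Or.inl (by rw [h1]; exact pvDpA_end cs slot_list (si + 1))
    · rw [if_neg h1, if_neg (by omega : ¬ slot_list.length ≤ si)] at hdp
      by_cases h3 : pvDpA cs slot_list i (si + 1) = true
      · exact Or.inl h3
      · rw [if_neg h3, List.any_eq_true] at hdp
        obtain ⟨opt, ho, hx⟩ := hdp
        rw [Bool.and_eq_true] at hx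
        refine Or.inr ⟨opt, ho, ?_, hx.2⟩
        simpa [pvStartswithAt, PySem.List.slice_from_natCast, hi] using hx.1
  · intro hcase
    rw [pvDpA]
    by_cases h1 : i = cs.length
    · rw [if_pos h1]
    · rw [if_neg h1, if_neg (by omega : ¬ slot_list.length ≤ si)]
      by_cases h3 : pvDpA cs slot_list i (si + 1) = true
      · rw [if_pos h3]
      · rw [if_neg h3]
        rcases hcase with hskip | ⟨opt, ho, hs, hd⟩
        · exact absurd hskip h3
        · rw [List.any_eq_true]
          refine ⟨opt, ho, ?_⟩
          rw [Bool.and_eq_true]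
          refine ⟨?_, hd⟩
          simpa [pvStartswithAt, PySem.List.slice_from_natCast, hi] using hs

-- MAIN: B's reachability fold over the remaining slots agrees with A's dp from any front set
theorem pvMain (cs : List Char) (slot_list : List (List String)) :
    ∀ d si (S : PySem.Set Nat), slot_list.length - si ≤ d →
      (∀ i ∈ S, i ≤ cs.length) →
      (cs.length ∈ List.foldl (pvStep cs) S (slot_list.drop si) ↔
        ∃ i ∈ S, pvDpA cs slot_list i si = true) := by
  intro d
  induction d with
  | zero =>
    intro si S hd hS
    have hsi : slot_list.length ≤ si := by omega
    rw [List.drop_eq_nil_of_le hsi]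
    simp only [List.foldl_nil]
    constructor
    · intro h; exact ⟨cs.length, h, pvDpA_end cs slot_list si⟩
    · rintro ⟨i, hi, hdp⟩
      rwa [(pvDpA_past cs slot_list i si hsi).mp hdp] at hi
  | succ d ih =>
    intro si S hd hS
    by_cases hsi : slot_list.length ≤ si
    · rw [List.drop_eq_nil_of_le hsi]
      simp only [List.foldl_nil]
      constructor
      · intro h; exact ⟨cs.length, h, pvDpA_end cs slot_list si⟩
      · rintro ⟨i, hi, hdp⟩
        rwa [(pvDpA_past cs slot_list i si hsi).mp hdp] at hi
    · rw [Nat.not_le] at hsi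
      rw [List.drop_eq_getElem_cons hsi, List.foldl_cons]
      have hget : slot_list[si] = slot_list.getD si [] := by
        simp [List.getD, List.getElem?_eq_getElem hsi]
      have ihx := ih (si + 1) (pvStep cs S (slot_list.getD si []))
        (by omega) (pvStep_bound cs S _ hS)
      rw [hget, ihx]
      constructor
      · rintro ⟨j, hj, hdp⟩
        rcases (mem_pvStep cs S _ j).mp hj with h | ⟨i, hiS, opt, ho, hs, hj'⟩
        · exact ⟨j, h, (pvDpA_cons cs slot_list j si hsi (hS j h)).mpr (Or.inl hdp)⟩
        · refine ⟨i, hiS, (pvDpA_cons cs slot_list i si hsi (hS i hiS)).mpr ?_⟩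
          exact Or.inr ⟨opt, ho, hs, hj' ▸ hdp⟩
      · rintro ⟨i, hiS, hdp⟩
        rcases (pvDpA_cons cs slot_list i si hsi (hS i hiS)).mp hdp with h | ⟨opt, ho, hs, hd'⟩
        · exact ⟨i, (mem_pvStep cs S _ i).mpr (Or.inl hiS), h⟩
        · exact ⟨i + opt.toList.length,
            (mem_pvStep cs S _ _).mpr (Or.inr ⟨i, hiS, opt, ho, hs, rfl⟩), hd'⟩

-- ===== VERDICT (by name: the statement is the Claim_ definition above) =====
theorem can_generate_word_spec : Claim_equal_can_generate_word := by
  intro word slot_list _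
  unfold Spec_can_generate_word can_generate_word can_generate_word_alt
  have h := pvMain word.toList slot_list slot_list.length 0 (PySem.Set.ofList [0])
    (by omega) (by intro i hi; simp [PySem.Set.mem_ofList] at hi; omega)
  rw [List.drop_zero] at h
  by_cases hc : pvDpA word.toList slot_list 0 0 = true
  · rw [hc]
    symm
    rw [PySem.Set.contains_iff]
    exact h.mpr ⟨0, by simp [PySem.Set.mem_ofList], hc⟩
  · rw [Bool.not_eq_true] at hc
    rw [hc]
    symm
    rw [Bool.eq_false_iff, Ne, PySem.Set.contains_iff]
    intro hmem
    rcases h.mp hmem with ⟨i, hi, hdp⟩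
    simp [PySem.Set.mem_ofList] at hi
    rw [hi] at hdp
    rw [hdp] at hc
    exact Bool.true_eq_false.mp hc
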